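-- pv_equiv track=rewrite | github.com/pisterlabs/promptset | data/scraping-2.0/repos/dong-river~CoRRPUS/utils~other_utils.py | text_to_code
-- ===== SOURCE A (Python) =====
-- import string
--
-- def text_to_code(s, capitalize=False, lower=True):
--     s = s.replace('\'t', ' not')
--     for punctuation in string.punctuation:
--         s = s.replace(punctuation, ' ')
--     s = s.replace('”', ' ').replace('“', ' ').replace('’', ' ').replace('‘', ' ').replace('—', ' ').replace('.', ' ').replace('…',' ')
--     s = s.strip().lower().replace(' ', '_')
--     while ('__' in s):
--         s = s.replace('__', '_')
--     return s
-- ===== SOURCE B (Python) =====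
-- import string
--
-- # separator characters: ASCII punctuation plus the curly quotes, em-dash and ellipsis
-- _SEP = set(string.punctuation) | set('”“’‘—…')
--
--
-- def _trim(s):
--     # strip characters that are whitespace or separators from both ends
--     while s and (s[0].isspace() or s[0] in _SEP):
--         s = s[1:]
--     while s and (s[-1].isspace() or s[-1] in _SEP):
--         s = s[:-1]
--     return s
--
--
-- def text_to_code(s, capitalize=False, lower=True):
--     s = _trim(s.replace('\'t', ' not').lower())
--     words = []
--     cur = ''
--     for ch in s:
--         if ch == ' ' or ch in _SEP:
--             if cur:
--                 words.append(cur)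
--             cur = ''
--         else:
--             cur += ch
--     if cur:
--         words.append(cur)
--     return '_'.join(words)
-- ===== Notes on version B (the rewrite author's own statement) =====
-- stated objective: simpler
-- what changed: Replaces A's chain of 39 whole-string replace passes plus a repeated underscore-collapsing while-loop by a trim of leading/trailing separator-or-whitespace characters followed by a single left-to-right scan that accumulates words and joins them with a single underscore.
import Mathlib
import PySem

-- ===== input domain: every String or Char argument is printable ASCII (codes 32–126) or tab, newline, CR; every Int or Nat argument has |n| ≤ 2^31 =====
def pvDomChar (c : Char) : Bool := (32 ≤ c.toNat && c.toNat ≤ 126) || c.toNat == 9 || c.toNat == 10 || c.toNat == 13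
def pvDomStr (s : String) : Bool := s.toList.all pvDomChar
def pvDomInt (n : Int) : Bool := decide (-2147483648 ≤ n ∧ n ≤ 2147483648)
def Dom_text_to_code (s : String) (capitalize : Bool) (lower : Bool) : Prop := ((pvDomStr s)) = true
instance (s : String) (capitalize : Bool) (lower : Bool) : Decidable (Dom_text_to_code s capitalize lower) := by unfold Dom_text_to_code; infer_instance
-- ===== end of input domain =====

-- B replaces A's 39 whole-string replace passes + repeated '__'-collapsing loop by one trim and
-- one left-to-right word-accumulating scan joined with '_' (objective: simpler, single pass).

-- ===== PORT A =====
-- string.punctuation, as the list of characters the Python for-loop iterates over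
def pvPunct : List Char :=
  ['!', '"', '#', '$', '%', '&', '\'', '(', ')', '*', '+', ',', '-', '.', '/',
   ':', ';', '<', '=', '>', '?', '@', '[', '\\', ']', '^', '_', '`', '{', '|', '}', '~']

-- reference form of PySem.Chars.replace (used to prove termination of the while-loop port)
def pvRep (old new : List Char) (l : List Char) : List Char :=
  if h : old ≠ [] ∧ old.isPrefixOf l = true then
    new ++ pvRep old new (l.drop old.length)
  else
    match l with
    | [] => []
    | c :: t => c :: pvRep old new t
termination_by l.length
decreasing_by
  · have hp := (List.isPrefixOf_iff_prefix.mp h.2).length_le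
    have h0 : 0 < old.length := List.length_pos_iff.mpr h.1
    simp only [List.length_drop]
    omega
  · simp

theorem pvRep_nil (old new : List Char) : pvRep old new [] = [] := by
  rw [pvRep]
  have : ¬ (old ≠ [] ∧ old.isPrefixOf ([] : List Char) = true) := by
    rintro ⟨h1, h2⟩
    cases old with
    | nil => exact h1 rfl
    | cons c t => simp [List.isPrefixOf] at h2
  rw [dif_neg this]

theorem pvRep_go_spec (old new : List Char) (hold : old ≠ []) :
    ∀ (fuel : Nat) (l acc : List Char), l.length ≤ fuel →
      PySem.Chars.replace.go old new fuel l acc = acc.reverse ++ pvRep old new l := by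
  intro fuel
  induction fuel with
  | zero =>
    intro l acc h
    have hl : l = [] := by cases l with | nil => rfl | cons c t => simp at h
    subst hl
    rw [PySem.Chars.replace.go.eq_def]
    simp [pvRep_nil]
  | succ n ih =>
    intro l acc h
    cases l with
    | nil =>
      rw [PySem.Chars.replace.go.eq_def]
      simp [pvRep_nil]
    | cons c t =>
      rw [PySem.Chars.replace.go.eq_def]
      simp only []
      by_cases hp : old.isPrefixOf (c :: t) = true
      · rw [if_pos hp]
        have hlen : ((c :: t).drop old.length).length ≤ n := by
          have := (List.isPrefixOf_iff_prefix.mp hp).length_le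
          have h0 : 0 < old.length := List.length_pos_iff.mpr hold
          simp only [List.length_drop]
          simp at h ⊢
          omega
        rw [ih _ _ hlen]
        conv_rhs => rw [pvRep, dif_pos ⟨hold, hp⟩]
        simp
      · rw [if_neg hp]
        have hlen : t.length ≤ n := by simp at h; omega
        rw [ih _ _ hlen]
        have hng : ¬(old ≠ [] ∧ old.isPrefixOf (c :: t) = true) := fun hh => hp hh.2
        conv_rhs => rw [pvRep, dif_neg hng]
        simp

theorem pvReplace_eq_pvRep (old new l : List Char) (hold : old ≠ []) :
    PySem.Chars.replace l old new = pvRep old new l := by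
  unfold PySem.Chars.replace
  rw [if_neg (by simpa using hold)]
  rw [pvRep_go_spec old new hold l.length l [] le_rfl]
  simp

theorem pvRep2_len_le : ∀ (n : Nat) (l : List Char), l.length ≤ n →
    (pvRep ['_', '_'] ['_'] l).length ≤ l.length := by
  intro n
  induction n with
  | zero =>
    intro l h
    have hl : l = [] := by cases l with | nil => rfl | cons c t => simp at h
    subst hl; simp [pvRep_nil]
  | succ n ih =>
    intro l h
    rw [pvRep]
    split
    · rename_i hg
      have hp := (List.isPrefixOf_iff_prefix.mp hg.2).length_le
      simp only [List.length_append, List.length_cons, List.length_nil]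
      have hd : (l.drop 2).length ≤ n := by simp; simp at hp h; omega
      have := ih (l.drop 2) hd
      simp only [List.length_drop] at this ⊢
      simp at hp
      norm_num
      omega
    · cases l with
      | nil => simp
      | cons c t =>
        simp only [List.length_cons]
        have := ih t (by simp at h; omega)
        omega

theorem pvRep2_len_lt : ∀ (n : Nat) (l : List Char), l.length ≤ n →
    (['_', '_'] <:+: l) → (pvRep ['_', '_'] ['_'] l).length < l.length := by
  intro n
  induction n with
  | zero =>
    intro l h hinf
    have hl : l = [] := by cases l with | nil => rfl | cons c t => simp at h
    subst hl
    have := hinf.sublist.length_le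
    simp at this
  | succ n ih =>
    intro l h hinf
    rw [pvRep]
    split
    · rename_i hg
      have hp := (List.isPrefixOf_iff_prefix.mp hg.2).length_le
      simp only [List.length_append, List.length_cons, List.length_nil]
      have hd : (l.drop 2).length ≤ n := by simp; simp at hp h; omega
      have := pvRep2_len_le n (l.drop 2) hd
      simp only [List.length_drop] at this ⊢
      simp at hp
      norm_num
      omega
    · rename_i hg
      cases l with
      | nil =>
        have := hinf.sublist.length_le
        simp at this
      | cons c t =>
        have hnp : ¬ (['_', '_'] <+: c :: t) := by
          intro hp
          exact hg ⟨by simp, List.isPrefixOf_iff_prefix.mpr hp⟩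
        have hit : ['_', '_'] <:+: t := by
          rcases List.infix_cons_iff.mp hinf with h1 | h2
          · exact absurd h1 hnp
          · exact h2
        have := ih t (by simp at h; omega) hit
        simp only [List.length_cons]
        omega

-- port of: while ('__' in s): s = s.replace('__', '_')
def pvCollapseLoop (l : List Char) : List Char :=
  if PySem.Chars.isIn ['_', '_'] l = true then
    pvCollapseLoop (PySem.Chars.replace l ['_', '_'] ['_'])
  else l
termination_by l.length
decreasing_by
  rw [pvReplace_eq_pvRep _ _ _ (by simp)]
  exact pvRep2_len_lt l.length l le_rfl ((PySem.Chars.isIn_iff_infix _ _).mp ‹_›)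

def text_to_code (s : String) (capitalize : Bool) (lower : Bool) : String :=
  let s1 := PySem.Str.replace s "'t" " not"
  let s2 := pvPunct.foldl (fun a p => PySem.Str.replace a (String.ofList [p]) " ") s1
  let s3 := PySem.Str.replace (PySem.Str.replace (PySem.Str.replace (PySem.Str.replace
            (PySem.Str.replace (PySem.Str.replace (PySem.Str.replace s2 "”" " ")
            "“" " ") "’" " ") "‘" " ") "—" " ") "." " ") "…" " "
  let s4 := PySem.Str.replace (PySem.Str.lower (PySem.Str.strip s3)) " " "_"
  String.ofList (pvCollapseLoop s4.toList)

-- ===== PORT B =====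
-- _SEP = set(string.punctuation) | set('”“’‘—…')
def pvSep : PySem.Set Char := PySem.Set.ofList (pvPunct ++ ['”', '“', '’', '‘', '—', '…'])

-- s[0].isspace() or s[0] in _SEP
def pvIsSepWs (c : Char) : Bool := PySem.Chars.isspace c || PySem.Set.contains pvSep c

-- while s and (s[0].isspace() or s[0] in _SEP): s = s[1:]
def pvTrimL : List Char → List Char
  | [] => []
  | c :: t => if pvIsSepWs c then pvTrimL t else c :: t

-- while s and (s[-1].isspace() or s[-1] in _SEP): s = s[:-1]
def pvTrimR (l : List Char) : List Char :=
  if hl : l = [] then []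
  else if pvIsSepWs (l.getLast hl) then pvTrimR l.dropLast else l
termination_by l.length
decreasing_by
  have : l ≠ [] := hl
  have : 0 < l.length := List.length_pos_iff.mpr this
  simp [List.length_dropLast]
  omega

-- the word-accumulating scan (words, cur — python appends words at the end)
def pvScan : List Char → List Char → List (List Char) → List (List Char)
  | [], cur, ws => if cur ≠ [] then ws ++ [cur] else ws
  | c :: t, cur, ws =>
    if (c == ' ' || PySem.Set.contains pvSep c) = true then
      pvScan t [] (if cur ≠ [] then ws ++ [cur] else ws)
    else
      pvScan t (cur ++ [c]) ws

def text_to_code_alt (s : String) (capitalize : Bool) (lower : Bool) : String :=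
  let t := PySem.Str.lower (PySem.Str.replace s "'t" " not")
  let m := pvTrimR (pvTrimL t.toList)
  String.ofList (PySem.Chars.join ['_'] (pvScan m [] []))

-- ===== PRECONDITION & SPEC =====
def Spec_text_to_code (s : String) (capitalize : Bool) (lower : Bool) (out : String) : Prop := out = text_to_code_alt s capitalize lower
instance (s : String) (capitalize : Bool) (lower : Bool) (out : String) : Decidable (Spec_text_to_code s capitalize lower out) := by unfold Spec_text_to_code; infer_instance

-- ===== CLAIM (what is proved, stated in full; the proofs are below) =====
def Claim_equal_text_to_code : Prop := ∀ (s : String) (capitalize : Bool) (lower : Bool), Dom_text_to_code s capitalize lower → Spec_text_to_code s capitalize lower (text_to_code s capitalize lower)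

-- ===== LEMMAS AND PROOFS =====

-- all separator characters (string.punctuation followed by the six extras), as one list
def pvAll : List Char := pvPunct ++ ['”', '“', '’', '‘', '—', '…']

def pvF (c : Char) : Bool := decide (c ∈ pvAll)

-- the combined effect of A's 39 replace passes on one character
def pvf (c : Char) : Char := if pvF c then ' ' else c

-- ' ' ↦ '_' (A's s.replace(' ', '_'))
def pvSp (c : Char) : Char := if c = ' ' then '_' else c

-- collapse of adjacent '__' (the fixpoint of A's while loop)
def pvCollapse : List Char → List Char
  | [] => []
  | [c] => [c]
  | a :: b :: t =>
    if a = '_' ∧ b = '_' then pvCollapse (b :: t) else a :: pvCollapse (b :: t)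

-- the common normal form
def pvCanon : List Char → List Char
  | [] => []
  | a :: t =>
    if a = ' ' then (if t.head? = some ' ' then pvCanon t else '_' :: pvCanon t)
    else a :: pvCanon t

-- space-only scanner (the scan after pvf is applied)
def pvScanSp : List Char → List Char → List (List Char) → List (List Char)
  | [], cur, ws => if cur ≠ [] then ws ++ [cur] else ws
  | c :: t, cur, ws =>
    if (c == ' ') = true then
      pvScanSp t [] (if cur ≠ [] then ws ++ [cur] else ws)
    else
      pvScanSp t (cur ++ [c]) ws

theorem pvRep_single (p q : Char) (l : List Char) :
    pvRep [p] [q] l = l.map (fun c => if c = p then q else c) := by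
  induction l with
  | nil => simp [pvRep_nil]
  | cons c t ih =>
    rw [pvRep]
    by_cases hc : c = p
    · subst hc
      rw [dif_pos ⟨by simp, by simp [List.isPrefixOf]⟩]
      simp [ih]
    · rw [dif_neg (by
        rintro ⟨h1, h2⟩
        simp [List.isPrefixOf] at h2
        exact hc h2.symm)]
      simp [ih, hc]

theorem pvFoldStr (ps : List Char) (s : String) :
    (ps.foldl (fun a p => PySem.Str.replace a (String.ofList [p]) " ") s).toList
      = ps.foldl (fun a p => pvRep [p] [' '] a) s.toList := by
  induction ps generalizing s with
  | nil => rfl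
  | cons p ps ih =>
    simp only [List.foldl_cons]
    rw [ih]
    congr 1
    rw [PySem.Str.toList_replace]
    rw [show (String.ofList [p]).toList = [p] by simp, show (" ".toList) = [' '] from by decide]
    exact pvReplace_eq_pvRep _ _ _ (by simp)

theorem pvFoldMap (ps : List Char) (l : List Char) :
    ps.foldl (fun a p => pvRep [p] [' '] a) l = l.map (fun c => if c ∈ ps then ' ' else c) := by
  induction ps generalizing l with
  | nil => simp
  | cons p ps ih =>
    simp only [List.foldl_cons]
    rw [pvRep_single, ih, List.map_map]
    apply List.map_congr_left
    intro c _
    by_cases hc : c = p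
    · subst hc
      simp [Function.comp]
    · simp only [Function.comp, if_neg hc, List.mem_cons]
      by_cases hm : c ∈ ps <;> simp [hm, hc]

theorem pvContains_eq (c : Char) : PySem.Set.contains pvSep c = pvF c := by
  rcases h : pvF c with _ | _
  · simp only [pvF, decide_eq_false_iff_not] at h
    rw [Bool.eq_false_iff]
    intro hc
    exact h (by simpa [pvSep, PySem.Set.mem_ofList, pvAll] using (PySem.Set.contains_iff _ _).mp hc)
  · simp only [pvF, decide_eq_true_eq] at h
    exact (PySem.Set.contains_iff _ _).mpr (by simpa [pvSep, PySem.Set.mem_ofList, pvAll] using h)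

theorem pvS0 (c : Char) : PySem.Chars.isspace (pvf c) = pvIsSepWs c := by
  unfold pvIsSepWs
  rw [pvContains_eq]
  by_cases h : pvF c = true
  · simp [pvf, h]
    decide
  · simp only [Bool.not_eq_true] at h
    simp [pvf, h]

theorem pvTrimL_eq (l : List Char) : pvTrimL l = l.dropWhile pvIsSepWs := by
  induction l with
  | nil => rfl
  | cons c t ih =>
    rw [pvTrimL, List.dropWhile_cons]
    split <;> simp_all

theorem pvTrimR_eq (l : List Char) : pvTrimR l = (l.reverse.dropWhile pvIsSepWs).reverse := by
  induction l using List.reverseRecOn with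
  | nil => rw [pvTrimR]; simp
  | append_singleton l c ih =>
    rw [pvTrimR]
    have hne : l ++ [c] ≠ [] := by simp
    rw [dif_neg hne]
    have hlast : (l ++ [c]).getLast hne = c := by simp
    rw [hlast]
    by_cases hc : pvIsSepWs c
    · rw [if_pos hc]
      simp only [List.dropLast_concat]
      rw [ih]
      congr 1
      rw [List.reverse_append]
      simp [List.dropWhile_cons, hc]
    · rw [if_neg hc]
      rw [List.reverse_append]
      simp [List.dropWhile_cons, hc]

theorem pvStrip_map (v : List Char) :
    PySem.Chars.strip (v.map pvf) = (pvTrimR (pvTrimL v)).map pvf := by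
  have hpred : (PySem.Chars.isspace ∘ pvf) = pvIsSepWs := funext pvS0
  unfold PySem.Chars.strip PySem.Chars.lstrip PySem.Chars.rstrip
  rw [pvTrimR_eq, pvTrimL_eq]
  rw [List.dropWhile_map, hpred]
  rw [← List.map_reverse, List.dropWhile_map, hpred]
  rw [List.map_reverse]

-- character-class facts for commuting lower()
theorem pvSep_not_upper (c : Char) (h : pvF c = true) : PySem.Chars.isupper c = false := by
  have hm : c ∈ pvAll := by simpa [pvF] using h
  have hall : pvAll.all (fun d => !PySem.Chars.isupper d) = true := by decide
  have := List.all_eq_true.mp hall c hm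
  simpa using this

theorem pvUpper_toNat (c : Char) (h : PySem.Chars.isupper c = true) :
    65 ≤ c.toNat ∧ c.toNat ≤ 90 := by
  simp [PySem.Chars.isupper] at h
  exact h

theorem pvLowerChar_toNat (c : Char) (h : PySem.Chars.isupper c = true) :
    (PySem.Chars.lowerChar c).toNat = c.toNat + 32 := by
  obtain ⟨h1, h2⟩ := pvUpper_toNat c h
  unfold PySem.Chars.lowerChar
  rw [if_pos h]
  rw [Char.toNat_ofNat]
  rw [if_pos]
  exact Or.inl (by omega)

theorem pvLower_not_sep (c : Char) (h : PySem.Chars.isupper c = true) :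
    pvF (PySem.Chars.lowerChar c) = false := by
  obtain ⟨h1, h2⟩ := pvUpper_toNat c h
  have hn := pvLowerChar_toNat c h
  rw [Bool.eq_false_iff]
  intro hc
  have hm : PySem.Chars.lowerChar c ∈ pvAll := by simpa [pvF] using hc
  have hall : pvAll.all (fun d => !(97 ≤ d.toNat && d.toNat ≤ 122)) = true := by decide
  have := List.all_eq_true.mp hall _ hm
  simp at this
  omega

theorem pvSep_not_upper_inv (c : Char) (h : PySem.Chars.isupper c = true) : pvF c = false := by
  rcases hF : pvF c with _ | _
  · rfl
  · rw [pvSep_not_upper c hF] at h; exact absurd h (by simp)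

theorem pvF_lower (c : Char) : pvF (PySem.Chars.lowerChar c) = pvF c := by
  by_cases h : PySem.Chars.isupper c = true
  · rw [pvLower_not_sep c h, pvSep_not_upper_inv c h]
  · have : PySem.Chars.lowerChar c = c := by unfold PySem.Chars.lowerChar; simp_all
    rw [this]

theorem pvf_lower_comm (c : Char) :
    pvf (PySem.Chars.lowerChar c) = PySem.Chars.lowerChar (pvf c) := by
  by_cases h : PySem.Chars.isupper c = true
  · have h1 := pvLower_not_sep c h
    have h2 := pvSep_not_upper_inv c h
    simp [pvf, h1, h2]
  · have hid : PySem.Chars.lowerChar c = c := by unfold PySem.Chars.lowerChar; simp_all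
    rw [hid]
    by_cases hF : pvF c = true
    · simp [pvf, hF]
      unfold PySem.Chars.lowerChar
      decide
    · simp only [Bool.not_eq_true] at hF
      simp [pvf, hF, hid]

theorem pvIsspace_lower (c : Char) :
    PySem.Chars.isspace (PySem.Chars.lowerChar c) = PySem.Chars.isspace c := by
  by_cases h : PySem.Chars.isupper c = true
  · obtain ⟨h1, h2⟩ := pvUpper_toNat c h
    have hn := pvLowerChar_toNat c h
    have e1 : PySem.Chars.isspace (PySem.Chars.lowerChar c) = false := by
      simp [PySem.Chars.isspace]
      omega
    have e2 : PySem.Chars.isspace c = false := by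
      simp [PySem.Chars.isspace]
      omega
    rw [e1, e2]
  · have : PySem.Chars.lowerChar c = c := by unfold PySem.Chars.lowerChar; simp_all
    rw [this]

theorem pvIsSepWs_lower (c : Char) : pvIsSepWs (PySem.Chars.lowerChar c) = pvIsSepWs c := by
  unfold pvIsSepWs
  rw [pvContains_eq, pvContains_eq, pvF_lower, pvIsspace_lower]

-- the B scan on raw characters is the space-only scan on the pvf image
theorem pvScan_eq_scanSp (v : List Char) : ∀ cur ws,
    pvScan v cur ws = pvScanSp (v.map pvf) cur ws := by
  induction v with
  | nil => intro cur ws; rfl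
  | cons c t ih =>
    intro cur ws
    rw [pvScan, List.map_cons, pvScanSp]
    by_cases hF : pvF c = true
    · have ht : (c == ' ' || PySem.Set.contains pvSep c) = true := by
        rw [pvContains_eq, hF]; simp
      have ht2 : ((pvf c) == ' ') = true := by simp [pvf, hF]
      rw [if_pos ht, if_pos ht2, ih]
    · simp only [Bool.not_eq_true] at hF
      have hfc : pvf c = c := by simp [pvf, hF]
      rw [hfc]
      by_cases hsp : (c == ' ') = true
      · rw [if_pos (by rw [hsp]; simp), if_pos hsp, ih]
      · have hsp' : (c == ' ') = false := by
          rcases h : (c == ' ') with _ | _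
          · rfl
          · exact absurd h hsp
        rw [if_neg (by rw [hsp', pvContains_eq, hF]; simp), if_neg hsp, ih]

theorem pvScanSp_acc (v : List Char) : ∀ cur ws,
    pvScanSp v cur ws = ws ++ pvScanSp v cur [] := by
  induction v with
  | nil =>
    intro cur ws
    rw [pvScanSp, pvScanSp]
    split <;> simp
  | cons c t ih =>
    intro cur ws
    rw [pvScanSp, pvScanSp]
    by_cases hc : (c == ' ') = true
    · rw [if_pos hc, if_pos hc]
      rw [ih [] (if cur ≠ [] then ws ++ [cur] else ws), ih [] (if cur ≠ [] then [] ++ [cur] else [])]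
      by_cases hcur : cur = [] <;> simp [hcur]
    · rw [if_neg hc, if_neg hc, ih]

theorem pvDropWhile_head (p : Char → Bool) : ∀ (l : List Char) (x : Char) (r : List Char),
    l.dropWhile p = x :: r → p x = false := by
  intro l
  induction l with
  | nil => intro x r h; simp at h
  | cons a t ih =>
    intro x r h
    rw [List.dropWhile_cons] at h
    split at h
    · exact ih x r h
    · cases h; simp_all

theorem pvLast_tail (c : Char) (t : List Char) (h : (c :: t).getLast? ≠ some ' ') :
    t.getLast? ≠ some ' ' := by
  cases t with
  | nil => simp
  | cons b t' => rwa [List.getLast?_cons_cons] at h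

theorem pvScanSp_space (t : List Char) (ws : List (List Char)) :
    pvScanSp (' ' :: t) [] ws = pvScanSp t [] ws := by
  rw [pvScanSp]
  simp

theorem pvCanon_space (t : List Char) : ∀ (_ : t ≠ []) (_ : t.getLast? ≠ some ' '),
    pvCanon (' ' :: t) = '_' :: pvCanon (t.dropWhile (fun c => c == ' ')) := by
  induction t with
  | nil => intro h _; exact absurd rfl h
  | cons a t' ih =>
    intro _ hlast
    by_cases ha : a = ' '
    · subst ha
      have ht' : t' ≠ [] := by
        intro h; subst h; simp at hlast
      have hlast' : t'.getLast? ≠ some ' ' := pvLast_tail _ _ hlast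
      rw [pvCanon]
      rw [if_pos rfl, if_pos (by simp)]
      rw [ih ht' hlast']
      have hdw : List.dropWhile (fun c => c == ' ') (' ' :: t')
          = List.dropWhile (fun c => c == ' ') t' := by
        rw [List.dropWhile_cons]
        simp
      rw [hdw]
    · rw [pvCanon]
      rw [if_pos rfl, if_neg (by simp [ha])]
      congr 1
      · rw [pvCanon]
        rw [if_neg ha]
        rw [List.dropWhile_cons, if_neg (by simp [ha])]
        rw [pvCanon, if_neg ha]

theorem pvCore (w : List Char) : w.getLast? ≠ some ' ' →
    (PySem.Chars.join ['_'] (pvScanSp w [] []) = pvCanon (w.dropWhile (fun c => c == ' '))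
     ∧ ∀ cur, cur ≠ [] → PySem.Chars.join ['_'] (pvScanSp w cur []) = cur ++ pvCanon w) := by
  induction w with
  | nil =>
    intro _
    constructor
    · rfl
    · intro cur hcur
      rw [pvScanSp, if_pos hcur]
      simp [PySem.Chars.join, List.intercalate, pvCanon]
  | cons c t ih =>
    intro hlast
    have hlast' : t.getLast? ≠ some ' ' := pvLast_tail _ _ hlast
    obtain ⟨ih1, ih2⟩ := ih hlast'
    by_cases hc : c = ' '
    · subst hc
      have ht : t ≠ [] := by
        intro h; subst h; simp at hlast
      constructor
      · rw [pvScanSp_space]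
        rw [ih1]
        have hdw : List.dropWhile (fun c => c == ' ') (' ' :: t)
            = List.dropWhile (fun c => c == ' ') t := by
          rw [List.dropWhile_cons]
          simp
        rw [hdw]
      · intro cur hcur
        rw [pvScanSp, if_pos (by simp), if_pos hcur]
        rw [pvScanSp_acc]
        simp only [List.nil_append]
        -- L := pvScanSp t [] [] ≠ []
        have hdrop : t.dropWhile (fun c => c == ' ') ≠ [] := by
          intro hnil
          have hallsp := List.dropWhile_eq_nil_iff.mp hnil
          have hmem := List.getLast_mem (l := t) ht
          have hx := hallsp _ hmem
          simp at hx
          exact hlast' (by rw [List.getLast?_eq_some_getLast ht, hx])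
        obtain ⟨x, r, hxr⟩ : ∃ x r, t.dropWhile (fun c => c == ' ') = x :: r := by
          cases hd : t.dropWhile (fun c => c == ' ') with
          | nil => exact absurd hd hdrop
          | cons x r => exact ⟨x, r, rfl⟩
        have hx : (x == ' ') = false := pvDropWhile_head _ t x r hxr
        have hcan : pvCanon (t.dropWhile (fun c => c == ' ')) ≠ [] := by
          rw [hxr, pvCanon]
          rw [if_neg (by simpa using hx)]
          simp
        have hL : pvScanSp t [] [] ≠ [] := by
          intro h
          rw [h] at ih1
          exact hcan (by simpa [PySem.Chars.join, List.intercalate] using ih1.symm)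
        obtain ⟨b, L', hbL⟩ : ∃ b L', pvScanSp t [] [] = b :: L' := by
          cases hd : pvScanSp t [] [] with
          | nil => exact absurd hd hL
          | cons b L' => exact ⟨b, L', rfl⟩
        rw [hbL]
        have hjoin : PySem.Chars.join ['_'] ([cur] ++ b :: L')
            = cur ++ '_' :: PySem.Chars.join ['_'] (b :: L') := by
          simp [PySem.Chars.join, List.intercalate]
        rw [hjoin]
        rw [← hbL, ih1]
        rw [pvCanon_space t ht hlast']
    · constructor
      · rw [pvScanSp, if_neg (by simp [hc])]
        simp only [List.nil_append]
        rw [ih2 [c] (by simp)]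
        rw [List.dropWhile_cons, if_neg (by simp [hc])]
        rw [pvCanon, if_neg hc]
        simp
      · intro cur hcur
        rw [pvScanSp, if_neg (by simp [hc])]
        rw [ih2 (cur ++ [c]) (by simp)]
        rw [pvCanon, if_neg hc]
        simp

-- collapse of a cons with head ≠ '_'
theorem pvCollapse_cons (c : Char) (hc : c ≠ '_') (X : List Char) :
    pvCollapse (c :: X) = c :: pvCollapse X := by
  cases X with
  | nil => rfl
  | cons b t => rw [pvCollapse, if_neg (by rintro ⟨h1, _⟩; exact hc h1)]

theorem pvCollapse_map (m : List Char) (hm : '_' ∉ m) :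
    pvCollapse (m.map pvSp) = pvCanon m := by
  induction m with
  | nil => rfl
  | cons a t ih =>
    have ha' : a ≠ '_' := by intro h; exact hm (by rw [h]; simp)
    have hm' : '_' ∉ t := fun h => hm (List.mem_cons_of_mem _ h)
    by_cases ha : a = ' '
    · subst ha
      simp only [List.map_cons, show pvSp ' ' = '_' from rfl]
      cases t with
      | nil => decide
      | cons b t' =>
        by_cases hb : b = ' '
        · subst hb
          simp only [List.map_cons, show pvSp ' ' = '_' from rfl]
          rw [pvCollapse, if_pos ⟨rfl, rfl⟩]
          have hih := ih hm'
          simp only [List.map_cons, show pvSp ' ' = '_' from rfl] at hih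
          rw [hih]
          have hrhs : pvCanon (' ' :: ' ' :: t') = pvCanon (' ' :: t') := by
            conv_lhs => rw [pvCanon]
            simp
          rw [hrhs]
        · have hb' : b ≠ '_' := by intro h; exact hm' (by rw [h]; simp)
          have hspb : pvSp b = b := by simp [pvSp, hb]
          simp only [List.map_cons, hspb]
          rw [pvCollapse, if_neg (by rintro ⟨_, h2⟩; exact hb' h2)]
          have hih := ih hm'
          simp only [List.map_cons, hspb] at hih
          rw [hih]
          have hrhs : pvCanon (' ' :: b :: t') = '_' :: pvCanon (b :: t') := by
            conv_lhs => rw [pvCanon]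
            simp [hb]
          rw [hrhs]
    · have hspa : pvSp a = a := by simp [pvSp, ha]
      simp only [List.map_cons, hspa]
      rw [pvCollapse_cons a ha', ih hm']
      have hrhs : pvCanon (a :: t) = a :: pvCanon t := by
        conv_lhs => rw [pvCanon]
        simp [ha]
      rw [hrhs]

-- rep2 facts
theorem pvRep2_cons_cons (t : List Char) :
    pvRep ['_', '_'] ['_'] ('_' :: '_' :: t) = '_' :: pvRep ['_', '_'] ['_'] t := by
  rw [pvRep, dif_pos ⟨by simp, by simp [List.isPrefixOf]⟩]
  simp

theorem pvRep2_cons (c : Char) (t : List Char) (h : ¬ (['_', '_'] <+: c :: t)) :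
    pvRep ['_', '_'] ['_'] (c :: t) = c :: pvRep ['_', '_'] ['_'] t := by
  rw [pvRep, dif_neg (by rintro ⟨_, h2⟩; exact h (List.isPrefixOf_iff_prefix.mp h2))]

theorem pvPrefix2_iff (c d : Char) (t : List Char) :
    (['_', '_'] <+: c :: d :: t) ↔ (c = '_' ∧ d = '_') := by
  constructor
  · intro h
    have := List.isPrefixOf_iff_prefix.mpr h
    simp [List.isPrefixOf] at this
    exact ⟨this.1.symm, this.2.symm⟩
  · rintro ⟨rfl, rfl⟩
    exact ⟨t, rfl⟩

theorem pvW : ∀ (n : Nat) (l : List Char), l.length ≤ n →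
    (pvCollapse (pvRep ['_', '_'] ['_'] l) = pvCollapse l
     ∧ pvCollapse ('_' :: pvRep ['_', '_'] ['_'] l) = pvCollapse ('_' :: l)) := by
  intro n
  induction n with
  | zero =>
    intro l h
    have hl : l = [] := by cases l with | nil => rfl | cons c t => simp at h
    subst hl
    rw [pvRep_nil]
    exact ⟨rfl, rfl⟩
  | succ n ih =>
    intro l hlen
    have F : pvCollapse (pvRep ['_', '_'] ['_'] l) = pvCollapse l := by
      rcases l with _ | ⟨c, _ | ⟨d, t⟩⟩
      · rw [pvRep_nil]
      · rw [pvRep2_cons c [] (by rintro ⟨r, hr⟩; simp at hr), pvRep_nil]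
      · by_cases h2 : c = '_' ∧ d = '_'
        · obtain ⟨rfl, rfl⟩ := h2
          rw [pvRep2_cons_cons]
          have hS := (ih t (by simp at hlen; omega)).2
          rw [hS]
          rw [pvCollapse, if_pos ⟨rfl, rfl⟩]
        · have hnp : ¬ (['_', '_'] <+: c :: d :: t) := by
            rw [pvPrefix2_iff]; exact h2
          rw [pvRep2_cons c (d :: t) hnp]
          by_cases hc : c = '_'
          · subst hc
            have hd : d ≠ '_' := by intro h; exact h2 ⟨rfl, h⟩
            have hF2 := (ih (d :: t) (by simp at hlen ⊢; omega)).1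
            have hrep : pvRep ['_', '_'] ['_'] (d :: t) = d :: pvRep ['_', '_'] ['_'] t := by
              apply pvRep2_cons
              intro hp
              have := (List.isPrefixOf_iff_prefix.mpr hp)
              simp [List.isPrefixOf] at this
              exact hd this.1.symm
            rw [hrep]
            rw [pvCollapse, if_neg (by rintro ⟨_, hh⟩; exact hd hh)]
            rw [← hrep, hF2]
            rw [pvCollapse, if_neg (by rintro ⟨_, hh⟩; exact hd hh)]
          · have hF2 := (ih (d :: t) (by simp at hlen ⊢; omega)).1
            rw [pvCollapse_cons c hc, hF2, ← pvCollapse_cons c hc]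
    have S : pvCollapse ('_' :: pvRep ['_', '_'] ['_'] l) = pvCollapse ('_' :: l) := by
      rcases l with _ | ⟨c, t⟩
      · rw [pvRep_nil]
      · by_cases hc : c = '_'
        · subst hc
          cases t with
          | nil =>
            rw [pvRep2_cons '_' [] (by rintro ⟨r, hr⟩; simp at hr), pvRep_nil]
          | cons d t' =>
            by_cases hd : d = '_'
            · subst hd
              rw [pvRep2_cons_cons]
              have hS := (ih t' (by simp at hlen; omega)).2
              rw [pvCollapse, if_pos ⟨rfl, rfl⟩, hS]
              conv_rhs => rw [pvCollapse, if_pos ⟨rfl, rfl⟩]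
              conv_rhs => rw [pvCollapse, if_pos ⟨rfl, rfl⟩]
            · have hrep : pvRep ['_', '_'] ['_'] ('_' :: d :: t')
                  = '_' :: pvRep ['_', '_'] ['_'] (d :: t') := by
                apply pvRep2_cons
                rw [pvPrefix2_iff]
                rintro ⟨_, hh⟩; exact hd hh
              rw [hrep]
              rw [pvCollapse, if_pos ⟨rfl, rfl⟩]
              have hS := (ih (d :: t') (by simp at hlen ⊢; omega)).2
              rw [hS]
              conv_rhs => rw [pvCollapse, if_pos ⟨rfl, rfl⟩]
        · have hrep : pvRep ['_', '_'] ['_'] (c :: t) = c :: pvRep ['_', '_'] ['_'] t := by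
            apply pvRep2_cons
            intro hp
            have := (List.isPrefixOf_iff_prefix.mpr hp)
            simp [List.isPrefixOf] at this
            exact hc this.1.symm
          rw [hrep]
          rw [pvCollapse, if_neg (by rintro ⟨_, hh⟩; exact hc hh)]
          rw [← hrep, F]
          rw [pvCollapse, if_neg (by rintro ⟨_, hh⟩; exact hc hh)]
    exact ⟨F, S⟩

theorem pvCollapse_noinfix : ∀ (l : List Char), ¬ (['_', '_'] <:+: l) → pvCollapse l = l := by
  intro l
  induction l with
  | nil => intro _; rfl
  | cons a t ih =>
    intro h
    cases t with
    | nil => rfl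
    | cons b t' =>
      rw [pvCollapse]
      rw [if_neg (by
        rintro ⟨rfl, rfl⟩
        exact h ((pvPrefix2_iff '_' '_' t').mpr ⟨rfl, rfl⟩).isInfix)]
      rw [ih (fun hi => h (List.infix_cons hi))]

theorem pvCollapseLoop_eq : ∀ (n : Nat) (l : List Char), l.length ≤ n →
    pvCollapseLoop l = pvCollapse l := by
  intro n
  induction n with
  | zero =>
    intro l h
    have hl : l = [] := by cases l with | nil => rfl | cons c t => simp at h
    subst hl
    rw [pvCollapseLoop, if_neg (by decide)]
    rfl
  | succ n ih =>
    intro l hlen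
    rw [pvCollapseLoop]
    by_cases hin : PySem.Chars.isIn ['_', '_'] l = true
    · rw [if_pos hin]
      rw [pvReplace_eq_pvRep _ _ _ (by simp)]
      have hlt := pvRep2_len_lt l.length l le_rfl ((PySem.Chars.isIn_iff_infix _ _).mp hin)
      rw [ih _ (by omega)]
      exact (pvW l.length l le_rfl).1
    · rw [if_neg hin]
      have : ¬ (['_', '_'] <:+: l) := by
        intro hi
        exact hin ((PySem.Chars.isIn_iff_infix _ _).mpr hi)
      exact (pvCollapse_noinfix l this).symm

-- no '_' survives pvf
theorem pvNoUnderscore (v : List Char) : '_' ∉ v.map pvf := by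
  intro h
  obtain ⟨c, _, hc⟩ := List.mem_map.mp h
  by_cases hF : pvF c = true
  · simp [pvf, hF] at hc
  · simp only [Bool.not_eq_true] at hF
    simp [pvf, hF] at hc
    subst hc
    have : pvF '_' = true := by decide
    rw [this] at hF
    exact absurd hF (by simp)

-- the trimmed string starts and ends with a non-separator, non-whitespace character
theorem pvTrim_head (v : List Char) (c : Char) (r : List Char)
    (h : pvTrimR (pvTrimL v) = c :: r) : pvIsSepWs c = false := by
  rw [pvTrimR_eq, pvTrimL_eq] at h
  have hsuf : ((v.dropWhile pvIsSepWs).reverse.dropWhile pvIsSepWs)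
      <:+ (v.dropWhile pvIsSepWs).reverse := List.dropWhile_suffix _
  have hpre : (((v.dropWhile pvIsSepWs).reverse.dropWhile pvIsSepWs).reverse)
      <+: v.dropWhile pvIsSepWs := by
    have := List.reverse_prefix.mpr hsuf
    simpa using this
  rw [h] at hpre
  obtain ⟨r2, hr2⟩ := hpre
  exact pvDropWhile_head pvIsSepWs v c (r ++ r2) (by rw [← hr2]; simp)

theorem pvTrim_last (v : List Char) (c : Char)
    (h : (pvTrimR (pvTrimL v)).getLast? = some c) : pvIsSepWs c = false := by
  rw [pvTrimR_eq] at h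
  rw [List.getLast?_reverse] at h
  cases hd : ((pvTrimL v).reverse.dropWhile pvIsSepWs) with
  | nil => rw [hd] at h; simp at h
  | cons x r =>
    rw [hd] at h
    simp at h
    rw [← h]
    exact pvDropWhile_head pvIsSepWs (pvTrimL v).reverse x r hd

-- ===== final assembly =====
theorem pvA3 (s : String) :
    (PySem.Str.replace (PySem.Str.replace (PySem.Str.replace (PySem.Str.replace
      (PySem.Str.replace (PySem.Str.replace (PySem.Str.replace
        (pvPunct.foldl (fun a p => PySem.Str.replace a (String.ofList [p]) " ")
          (PySem.Str.replace s "'t" " not")) "”" " ")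
      "“" " ") "’" " ") "‘" " ") "—" " ") "." " ") "…" " ").toList
      = ((PySem.Str.replace s "'t" " not").toList).map pvf := by
  have hA2 : (pvPunct.foldl (fun a p => PySem.Str.replace a (String.ofList [p]) " ")
      (PySem.Str.replace s "'t" " not")).toList
      = ((PySem.Str.replace s "'t" " not").toList).map (fun c => if c ∈ pvPunct then ' ' else c) := by
    rw [pvFoldStr, pvFoldMap]
  simp only [PySem.Str.toList_replace]
  rw [show ("”".toList) = ['”'] from by decide, show ("“".toList) = ['“'] from by decide,
      show ("’".toList) = ['’'] from by decide, show ("‘".toList) = ['‘'] from by decide,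
      show ("—".toList) = ['—'] from by decide, show (".".toList) = ['.'] from by decide,
      show ("…".toList) = ['…'] from by decide, show (" ".toList) = [' '] from by decide]
  rw [pvReplace_eq_pvRep _ _ _ (by simp)]
  rw [pvReplace_eq_pvRep _ _ _ (by simp)]
  rw [pvReplace_eq_pvRep _ _ _ (by simp)]
  rw [pvReplace_eq_pvRep _ _ _ (by simp)]
  rw [pvReplace_eq_pvRep _ _ _ (by simp)]
  rw [pvReplace_eq_pvRep _ _ _ (by simp)]
  rw [pvReplace_eq_pvRep _ _ _ (by simp)]
  rw [hA2]
  rw [show ∀ (l : List Char),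
      pvRep ['…'] [' '] (pvRep ['.'] [' '] (pvRep ['—'] [' '] (pvRep ['‘'] [' '] (pvRep ['’'] [' ']
        (pvRep ['“'] [' '] (pvRep ['”'] [' '] l))))))
      = (['”', '“', '’', '‘', '—', '.', '…'] : List Char).foldl (fun a p => pvRep [p] [' '] a) l
    from fun l => rfl]
  rw [pvFoldMap, List.map_map]
  rw [PySem.Str.toList_replace]
  apply List.map_congr_left
  intro c _
  simp only [Function.comp_apply]
  by_cases hp : c ∈ pvPunct
  · rw [if_pos hp]
    rw [if_neg (by decide)]
    have hF : pvF c = true := by simp [pvF, pvAll, hp]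
    simp [pvf, hF]
  · rw [if_neg hp]
    by_cases he : c ∈ (['”', '“', '’', '‘', '—', '.', '…'] : List Char)
    · rw [if_pos he]
      have hF : pvF c = true := by
        simp only [List.mem_cons, List.not_mem_nil, or_false] at he
        rcases he with rfl | rfl | rfl | rfl | rfl | rfl | rfl
        · decide
        · decide
        · decide
        · decide
        · decide
        · exact absurd (by decide : ('.' : Char) ∈ pvPunct) hp
        · decide
      simp [pvf, hF]
    · rw [if_neg he]
      have hF : pvF c = false := by
        simp only [pvF, pvAll, decide_eq_false_iff_not, List.mem_append]
        rintro (h | h)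
        · exact hp h
        · simp only [List.mem_cons, List.not_mem_nil, or_false] at h
          rcases h with rfl | rfl | rfl | rfl | rfl | rfl
          all_goals exact he (by decide)
      simp [pvf, hF]

theorem pvTrim_map_lower (u : List Char) :
    (pvTrimR (pvTrimL u)).map PySem.Chars.lowerChar
      = pvTrimR (pvTrimL (u.map PySem.Chars.lowerChar)) := by
  have hcomp : (pvIsSepWs ∘ PySem.Chars.lowerChar) = pvIsSepWs := funext pvIsSepWs_lower
  rw [pvTrimL_eq, pvTrimL_eq, pvTrimR_eq, pvTrimR_eq]
  rw [List.dropWhile_map, hcomp]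
  rw [← List.map_reverse, List.dropWhile_map, hcomp]
  rw [List.map_reverse]

theorem pvMainList (u : List Char) :
    pvCollapseLoop (pvRep [' '] ['_'] (PySem.Chars.lower (PySem.Chars.strip (u.map pvf))))
      = PySem.Chars.join ['_'] (pvScan (pvTrimR (pvTrimL (PySem.Chars.lower u))) [] []) := by
  have hA : PySem.Chars.lower (PySem.Chars.strip (u.map pvf))
      = (pvTrimR (pvTrimL (u.map PySem.Chars.lowerChar))).map pvf := by
    rw [pvStrip_map u]
    unfold PySem.Chars.lower
    rw [List.map_map]
    rw [show (PySem.Chars.lowerChar ∘ pvf) = (pvf ∘ PySem.Chars.lowerChar) from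
      funext (fun c => (pvf_lower_comm c).symm)]
    rw [← List.map_map]
    rw [pvTrim_map_lower]
  rw [hA]
  set m : List Char := pvTrimR (pvTrimL (u.map PySem.Chars.lowerChar)) with hm
  have hsp : pvRep [' '] ['_'] (m.map pvf) = (m.map pvf).map pvSp := by
    rw [pvRep_single]
    rfl
  rw [hsp]
  rw [pvCollapseLoop_eq ((m.map pvf).map pvSp).length _ le_rfl]
  rw [pvCollapse_map (m.map pvf) (pvNoUnderscore m)]
  -- B side
  have hlow : PySem.Chars.lower u = u.map PySem.Chars.lowerChar := rfl
  rw [hlow, ← hm]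
  rw [pvScan_eq_scanSp]
  have hMlast : (m.map pvf).getLast? ≠ some ' ' := by
    intro h
    rw [List.getLast?_map] at h
    cases hml : m.getLast? with
    | none => rw [hml] at h; simp at h
    | some c =>
      rw [hml] at h
      simp at h
      have hns := pvTrim_last (u.map PySem.Chars.lowerChar) c (hm ▸ hml)
      unfold pvIsSepWs at hns
      rcases hF : pvF c with _ | _
      · simp [pvf, hF] at h
        rw [h] at hns
        simp [PySem.Chars.isspace] at hns
      · rw [pvContains_eq, hF] at hns
        simp at hns
  rw [(pvCore (m.map pvf) hMlast).1]
  -- the trimmed list does not start with a space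
  have hdrop : (m.map pvf).dropWhile (fun c => c == ' ') = m.map pvf := by
    cases hMc : m with
    | nil => simp
    | cons c0 r0 =>
      simp only [List.map_cons]
      rw [List.dropWhile_cons]
      rw [if_neg]
      intro hsp0
      simp at hsp0
      have hhead := pvTrim_head (u.map PySem.Chars.lowerChar) c0 r0 (hm ▸ hMc)
      unfold pvIsSepWs at hhead
      rcases hF : pvF c0 with _ | _
      · simp [pvf, hF] at hsp0
        rw [hsp0] at hhead
        simp [PySem.Chars.isspace] at hhead
      · rw [pvContains_eq, hF] at hhead
        simp at hhead
  rw [hdrop]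

theorem pvMain (s : String) (capitalize lower : Bool) :
    text_to_code s capitalize lower = text_to_code_alt s capitalize lower := by
  simp only [text_to_code, text_to_code_alt]
  congr 1
  rw [PySem.Str.toList_replace, PySem.Str.toList_lower, PySem.Str.toList_strip, pvA3]
  rw [show (" ".toList) = [' '] from by decide, show ("_".toList) = ['_'] from by decide]
  rw [pvReplace_eq_pvRep _ _ _ (by simp)]
  rw [PySem.Str.toList_lower]
  exact pvMainList ((PySem.Str.replace s "'t" " not").toList)

-- ===== VERDICT (by name: the statement is the Claim_ definition above) =====
theorem text_to_code_spec : Claim_equal_text_to_code := by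
  intro s capitalize lower _
  unfold Spec_text_to_code
  exact pvMain s capitalize lower
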